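-- pv_equiv track=rewrite | github.com/anoopbabu29/happy_sum_analysis | sum_square.py | max_len_dict_list
-- ===== SOURCE A (Python) =====
-- from typing import Dict, List, Tuple
--
-- def max_len_dict_list(dict_list: Dict[int, List[int]]) -> Tuple[List[int], int]:
--     curr_max: int = 0
--     curr_ind: List[int] = [0]
--
--     for key in dict_list.keys():
--         this_len: int = len(dict_list[key])
--         if curr_max < this_len:
--             curr_max = this_len
--             curr_ind = [key]
--         elif curr_max == this_len:
--             curr_ind.append(key)
--
--     return curr_ind, curr_max
-- ===== SOURCE B (Python) =====
-- def max_len_dict_list(dict_list):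
--     lengths = {k: len(v) for k, v in dict_list.items()}
--     max_len = max(lengths.values(), default=0)
--     return [k for k, l in lengths.items() if l == max_len], max_len
-- ===== Notes on version B (the rewrite author's own statement) =====
-- stated objective: simpler
-- what changed: Replaces the single running-max scan with accumulator resets by two passes: compute the maximum list length once, then collect in order the keys attaining it.
-- intended difference: When every list in the dict is empty (including the empty dict), A returns a spurious key 0 from its curr_ind=[0] initializer (e.g. ([0, 5], 0) for {5: []}); B returns exactly the keys attaining the maximum length 0 (([5], 0)), which is the intended value since 0 is not a key of the dict. — e.g. on max_len_dict_list([(5, [])]): A returns ([0, 5], 0), B returns ([5], 0)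
import Mathlib
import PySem

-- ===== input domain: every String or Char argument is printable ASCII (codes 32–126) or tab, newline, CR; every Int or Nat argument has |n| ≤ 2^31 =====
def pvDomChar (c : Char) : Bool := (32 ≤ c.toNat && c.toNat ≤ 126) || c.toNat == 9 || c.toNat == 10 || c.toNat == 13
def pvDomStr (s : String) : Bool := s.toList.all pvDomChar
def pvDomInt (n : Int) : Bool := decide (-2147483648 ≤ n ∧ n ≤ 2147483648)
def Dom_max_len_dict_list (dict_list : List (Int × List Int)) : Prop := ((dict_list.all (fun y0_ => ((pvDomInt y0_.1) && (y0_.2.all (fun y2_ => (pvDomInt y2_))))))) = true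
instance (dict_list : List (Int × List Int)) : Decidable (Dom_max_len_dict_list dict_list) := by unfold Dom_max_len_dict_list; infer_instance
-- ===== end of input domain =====

-- B computes the result in two passes (max list length, then the keys attaining it) instead of A's
-- running-max scan; on all-empty inputs A returns a spurious key 0 from its initializer, B does not (D_ below).


-- ===== PORT A =====
-- Port of A: single scan with running max, the accumulator starts as ([0], 0).
def pvStepA (st : List Int × Int) (kv : Int × List Int) : List Int × Int :=
  let this_len : Int := kv.2.length
  if st.2 < this_len then ([kv.1], this_len)
  else if st.2 = this_len then (st.1 ++ [kv.1], st.2)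
  else st

def max_len_dict_list (dict_list : List (Int × List Int)) : List Int × Int :=
  dict_list.foldl pvStepA ([0], 0)

-- ===== PORT B =====
-- Port of B: (key, length) pairs, overall max length (default 0), then the keys attaining it.
def max_len_dict_list_alt (dict_list : List (Int × List Int)) : List Int × Int :=
  let lengths : List (Int × Int) := dict_list.map (fun kv => (kv.1, (kv.2.length : Int)))
  let max_len : Int := lengths.foldl (fun a kl => max a kl.2) 0
  ((lengths.filter (fun kl => kl.2 == max_len)).map (·.1), max_len)

-- ===== PRECONDITION & SPEC =====
-- When every list in the dict is empty (including the empty dict), A returns a spurious key 0 from its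
-- curr_ind=[0] initializer (e.g. ([0, 5], 0) for {5: []}); B returns exactly the keys attaining the maximum
-- length 0 (([5], 0)), which is the intended value since 0 is not a key of the dict.
def D_max_len_dict_list (dict_list : List (Int × List Int)) : Prop :=
  ∀ kv ∈ dict_list, kv.2 = []
instance (dict_list : List (Int × List Int)) : Decidable (D_max_len_dict_list dict_list) := by unfold D_max_len_dict_list; infer_instance

def Spec_max_len_dict_list (dict_list : List (Int × List Int)) (out : List Int × Int) : Prop := ¬ D_max_len_dict_list dict_list → out = max_len_dict_list_alt dict_list
instance (dict_list : List (Int × List Int)) (out : List Int × Int) : Decidable (Spec_max_len_dict_list dict_list out) := by unfold Spec_max_len_dict_list; infer_instance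

def pvDiffWitness_max_len_dict_list : (List (Int × List Int)) := [(5, [])]
def pvDiffWitnessOut_max_len_dict_list : (List Int × Int) × (List Int × Int) := (([0, 5], 0), ([5], 0))

-- ===== CLAIM (what is proved, stated in full; the proofs are below) =====
def Claim_unchanged_max_len_dict_list : Prop := ∀ (dict_list : List (Int × List Int)), Dom_max_len_dict_list dict_list → Spec_max_len_dict_list dict_list (max_len_dict_list dict_list)
def Claim_changed_max_len_dict_list : Prop := Dom_max_len_dict_list (pvDiffWitness_max_len_dict_list) ∧ D_max_len_dict_list (pvDiffWitness_max_len_dict_list) ∧ max_len_dict_list (pvDiffWitness_max_len_dict_list) = pvDiffWitnessOut_max_len_dict_list.1 ∧ max_len_dict_list_alt (pvDiffWitness_max_len_dict_list) = pvDiffWitnessOut_max_len_dict_list.2 ∧ pvDiffWitnessOut_max_len_dict_list.1 ≠ pvDiffWitnessOut_max_len_dict_list.2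
def Claim_exact_max_len_dict_list : Prop := ∀ (dict_list : List (Int × List Int)), Dom_max_len_dict_list dict_list → D_max_len_dict_list dict_list → max_len_dict_list dict_list ≠ max_len_dict_list_alt dict_list

-- ===== LEMMAS AND PROOFS =====

-- overall max of the lengths, seeded with m (A's running max / B's fold)
def pvM (l : List (Int × List Int)) (m : Int) : Int :=
  l.foldl (fun a kv => max a (kv.2.length : Int)) m

lemma pvM_le (l : List (Int × List Int)) : ∀ m : Int, m ≤ pvM l m := by
  induction l with
  | nil => intro m; simp [pvM]
  | cons kv rest ih =>
      intro m
      exact le_trans (le_max_left m (kv.2.length : Int)) (ih (max m (kv.2.length : Int)))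

lemma pvM_mem_le (l : List (Int × List Int)) : ∀ m : Int, ∀ kv ∈ l, (kv.2.length : Int) ≤ pvM l m := by
  induction l with
  | nil => intro m kv h; cases h
  | cons a rest ih =>
      intro m kv h
      rw [List.mem_cons] at h
      rcases h with h | h
      · subst h
        exact le_trans (le_max_right m (kv.2.length : Int)) (pvM_le rest _)
      · exact ih _ kv h

-- A's fold characterised: the sentinel survives iff the seed max is never beaten
lemma pvFoldA (l : List (Int × List Int)) : ∀ (ind : List Int) (m : Int),
    l.foldl pvStepA (ind, m) =
      ((if m = pvM l m then ind else []) ++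
        (l.filter (fun kv => (kv.2.length : Int) == pvM l m)).map (·.1), pvM l m) := by
  induction l with
  | nil => intro ind m; simp [pvM]
  | cons kv rest ih =>
      intro ind m
      have hM : pvM (kv :: rest) m = pvM rest (max m (kv.2.length : Int)) := by
        simp [pvM]
      by_cases h1 : m < (kv.2.length : Int)
      · have hmax : max m (kv.2.length : Int) = (kv.2.length : Int) := by omega
        have hP : pvM (kv :: rest) m = pvM rest (kv.2.length : Int) := by rw [hM, hmax]
        have hle : (kv.2.length : Int) ≤ pvM rest (kv.2.length : Int) := pvM_le _ _
        have hne : m ≠ pvM rest (kv.2.length : Int) := by omega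
        simp only [List.foldl_cons, pvStepA, if_pos h1]
        rw [ih [kv.1] (kv.2.length : Int), hP, List.filter_cons]
        by_cases h2 : (kv.2.length : Int) = pvM rest (kv.2.length : Int)
        · have hne2 : m ≠ (kv.2.length : Int) := by omega
          simp [← h2, hne2]
        · simp [h2, hne]
      · by_cases h2 : m = (kv.2.length : Int)
        · have hmax : max m (kv.2.length : Int) = m := by omega
          have hP : pvM (kv :: rest) m = pvM rest m := by rw [hM, hmax]
          simp only [List.foldl_cons, pvStepA, if_neg h1, if_pos h2]
          rw [ih (ind ++ [kv.1]) m, hP, List.filter_cons]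
          by_cases h3 : m = pvM rest m
          · simp [← h3, ← h2]
          · simp [h3, ← h2]
        · have h3 : (kv.2.length : Int) < m := by omega
          have hmax : max m (kv.2.length : Int) = m := by omega
          have hP : pvM (kv :: rest) m = pvM rest m := by rw [hM, hmax]
          have hne : (kv.2.length : Int) ≠ pvM rest m := by
            have := pvM_le rest m; omega
          simp only [List.foldl_cons, pvStepA, if_neg h1, if_neg h2]
          rw [ih ind m, hP, List.filter_cons]
          simp [hne]

-- B's port rewritten through pvM and a filter over the original list
lemma pvAltEq (l : List (Int × List Int)) :
    max_len_dict_list_alt l =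
      ((l.filter (fun kv => (kv.2.length : Int) == pvM l 0)).map (·.1), pvM l 0) := by
  unfold max_len_dict_list_alt pvM
  simp [List.foldl_map, List.filter_map, List.map_map, Function.comp_def]

lemma pvM_zero_of_D (l : List (Int × List Int)) (hD : ∀ kv ∈ l, kv.2 = []) : pvM l 0 = 0 := by
  induction l with
  | nil => simp [pvM]
  | cons a rest ih =>
      have ha : a.2 = [] := hD a (by simp)
      have : pvM (a :: rest) 0 = pvM rest 0 := by simp [pvM, ha]
      rw [this]
      exact ih (fun kv h => hD kv (by simp [h]))

theorem max_len_dict_list_spec : Claim_unchanged_max_len_dict_list := by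
  intro dl _ hD
  unfold max_len_dict_list
  rw [pvFoldA dl [0] 0, pvAltEq]
  -- outside D_ some list is nonempty, so the max is positive and the sentinel branch vanishes
  unfold D_max_len_dict_list at hD
  push Not at hD
  obtain ⟨kv, hmem, hne⟩ := hD
  have h1 : (1 : Int) ≤ (kv.2.length : Int) := by
    have : kv.2.length ≠ 0 := fun h => hne (List.eq_nil_of_length_eq_zero h)
    omega
  have h2 : (kv.2.length : Int) ≤ pvM dl 0 := pvM_mem_le dl 0 kv hmem
  have h0 : (0 : Int) ≠ pvM dl 0 := by omega
  simp [h0]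

theorem max_len_dict_list_changed : Claim_changed_max_len_dict_list := by
  unfold Claim_changed_max_len_dict_list; decide

theorem max_len_dict_list_tight : Claim_exact_max_len_dict_list := by
  intro dl _ hD
  unfold max_len_dict_list D_max_len_dict_list at *
  rw [pvFoldA dl [0] 0, pvAltEq, pvM_zero_of_D dl hD]
  intro h
  have := congrArg (fun p => p.1.length) h
  simp at this
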